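-- pv_equiv track=rewrite | github.com/benmol1/factorio | quality/recycler_assembler_loop.py | get_all_configs
-- ===== SOURCE A (Python) =====
-- import itertools
--
-- NUM_TIERS = 3
--
-- def get_all_configs(module_slots : int):
--     "Generate all possible configurations for an assembler with `n` module slots."
--     module_variations_for_assembler = []
--
--     for p in range(module_slots + 1):
--         q = module_slots - p
--         module_variations_for_assembler.append((p, q))
--
--     res = list(itertools.product(* [module_variations_for_assembler] * NUM_TIERS))
--
--     for i in range(len(res)):
--         res[i] = list(res[i])
--
--     return res
-- ===== SOURCE B (Python) =====
-- NUM_TIERS = 3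
--
-- def get_all_configs(module_slots : int):
--     "Generate all possible configurations for an assembler with `n` module slots."
--     m = module_slots + 1
--     if m <= 0:
--         return []
--     pairs = [(d, module_slots - d) for d in range(m)]
--     # columnar mixed-radix enumeration: tier 0 repeats each pair m*m times,
--     # tier 1 repeats each pair m times (whole column repeated m times),
--     # tier 2 cycles through the pairs m*m times; zip the three columns
--     hi = []
--     mid = []
--     for p in pairs:
--         hi += [p] * (m * m)
--         mid += [p] * m
--     res = list(zip(hi, mid * m, pairs * (m * m)))
--     for i in range(len(res)):
--         res[i] = list(res[i])
--     return res
-- ===== Notes on version B (the rewrite author's own statement) =====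
-- stated objective: alternative
-- what changed: Replaces the itertools.product Cartesian cube of the pair list with a columnar mixed-radix enumeration: three run-length-repeated columns (periods m*m, m and 1) are built by list repetition and zipped together into the configurations.
import Mathlib
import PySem

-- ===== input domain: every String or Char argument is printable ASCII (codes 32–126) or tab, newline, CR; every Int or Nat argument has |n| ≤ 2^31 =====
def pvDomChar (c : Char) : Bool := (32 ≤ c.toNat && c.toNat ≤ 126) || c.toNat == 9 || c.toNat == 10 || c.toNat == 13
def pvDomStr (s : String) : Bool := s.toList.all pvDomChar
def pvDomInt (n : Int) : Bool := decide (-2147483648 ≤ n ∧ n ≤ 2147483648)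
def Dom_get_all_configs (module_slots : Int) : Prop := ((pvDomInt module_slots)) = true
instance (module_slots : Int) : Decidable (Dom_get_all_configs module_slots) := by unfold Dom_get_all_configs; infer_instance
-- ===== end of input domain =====

-- B replaces the pair list + itertools.product Cartesian cube by a columnar mixed-radix
-- enumeration: three run-length-repeated columns (periods m*m, m, 1) zipped together
-- (alternative decomposition, same asymptotic cost).

-- ===== PORT A =====
-- literal port: build the (p, n-p) pair list by an appending loop, take its 3-fold
-- Cartesian product (itertools.product = nested flatMap, last factor fastest), then
-- convert each tuple to a list
def get_all_configs (module_slots : Int) : List (List (Int × Int)) :=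
  let pairs := (PySem.List.pyRange 0 (module_slots + 1) 1).foldl
    (fun acc p => acc ++ [(p, module_slots - p)]) []
  let res := pairs.flatMap (fun a => pairs.flatMap (fun b => pairs.map (fun c => (a, b, c))))
  res.map (fun t => [t.1, t.2.1, t.2.2])

-- ===== PORT B =====
-- literal port of Source B: pairs by comprehension; one loop extending the two repeated
-- columns hi and mid ([p]*k = PySem.List.pyRepeat [p] k); zip the three columns
-- (Python's 3-tuples are (x, (y, z)) here); convert each tuple to a list
def get_all_configs_alt (module_slots : Int) : List (List (Int × Int)) :=
  let m := module_slots + 1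
  if m ≤ 0 then []
  else
    let pairs := (PySem.List.pyRange 0 m 1).map (fun d => (d, module_slots - d))
    let hm := pairs.foldl (fun (acc : List (Int × Int) × List (Int × Int)) p =>
      (acc.1 ++ PySem.List.pyRepeat [p] (m * m), acc.2 ++ PySem.List.pyRepeat [p] m)) ([], [])
    let res := hm.1.zip ((PySem.List.pyRepeat hm.2 m).zip (PySem.List.pyRepeat pairs (m * m)))
    res.map (fun t => [t.1, t.2.1, t.2.2])

-- ===== PRECONDITION & SPEC =====
def Spec_get_all_configs (module_slots : Int) (out : List (List (Int × Int))) : Prop := out = get_all_configs_alt module_slots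
instance (module_slots : Int) (out : List (List (Int × Int))) : Decidable (Spec_get_all_configs module_slots out) := by unfold Spec_get_all_configs; infer_instance

-- ===== CLAIM (what is proved, stated in full; the proofs are below) =====
def Claim_equal_get_all_configs : Prop := ∀ (module_slots : Int), Dom_get_all_configs module_slots → Spec_get_all_configs module_slots (get_all_configs module_slots)

-- ===== LEMMAS AND PROOFS =====

theorem pv_pyRepeat_natCast {α : Type} (xs : List α) (k : Nat) :
    PySem.List.pyRepeat xs (k : Int) = (List.replicate k xs).flatten := by
  simp [PySem.List.pyRepeat]

-- the two-column building loop of B, as two flatMaps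
theorem pv_foldl_two_cols (m : Int) (l h1 h2 : List (Int × Int)) :
    l.foldl (fun (acc : List (Int × Int) × List (Int × Int)) p =>
        (acc.1 ++ PySem.List.pyRepeat [p] (m * m), acc.2 ++ PySem.List.pyRepeat [p] m)) (h1, h2)
      = (h1 ++ l.flatMap (fun p => PySem.List.pyRepeat [p] (m * m)),
         h2 ++ l.flatMap (fun p => PySem.List.pyRepeat [p] m)) := by
  induction l generalizing h1 h2 with
  | nil => simp
  | cons p l ih =>
    rw [List.foldl_cons, ih]
    simp [List.flatMap_cons, List.append_assoc]

-- zip of a constant column with a list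
theorem pv_zip_replicate_left {α β : Type} (a : α) (rs : List β) :
    (List.replicate rs.length a).zip rs = rs.map (fun c => (a, c)) := by
  induction rs with
  | nil => rfl
  | cons c rs ih => simp [List.replicate_succ, ih]

-- one level of the mixed-radix zip: period-k column against a cycled column
theorem pv_zip_level {α β : Type} (k j : Nat) (qs : List α) (rs : List β)
    (hk : rs.length = k) (hj : qs.length = j) :
    (qs.flatMap (fun b => List.replicate k b)).zip ((List.replicate j rs).flatten)
      = qs.flatMap (fun b => rs.map (fun c => (b, c))) := by
  induction qs generalizing j with
  | nil => simp
  | cons b qs ih =>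
    subst hj
    rw [List.flatMap_cons, List.length_cons, List.replicate_succ, List.flatten_cons,
      List.zip_append (by simp [hk]), ih _ rfl, ← hk, pv_zip_replicate_left,
      List.flatMap_cons]

-- zip distributes over equally-cut concatenations
theorem pv_zip_flatten_replicate {α β : Type} (j : Nat) (X : List α) (Y : List β)
    (h : X.length = Y.length) :
    ((List.replicate j X).flatten).zip ((List.replicate j Y).flatten)
      = (List.replicate j (X.zip Y)).flatten := by
  induction j with
  | zero => rfl
  | succ j ih => simp [List.replicate_succ, List.zip_append h, ih]

-- a*b copies of X = a copies of (b copies of X)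
theorem pv_replicate_mul_flatten {α : Type} (a b : Nat) (X : List α) :
    (List.replicate (a * b) X).flatten = (List.replicate a ((List.replicate b X).flatten)).flatten := by
  induction a with
  | zero => simp
  | succ a ih =>
    rw [Nat.succ_mul, List.replicate_add, List.flatten_append, ih, List.replicate_succ',
      List.flatten_append]
    simp

-- M copies of [p] flattened = M copies of p
theorem pv_flatten_replicate_singleton {α : Type} (p : α) (k : Nat) :
    (List.replicate k ([p] : List α)).flatten = List.replicate k p := by
  induction k with
  | zero => rfl
  | succ k ih => simp [List.replicate_succ, ih]

theorem get_all_configs_eq_alt (n : Int) :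
    get_all_configs n = get_all_configs_alt n := by
  unfold get_all_configs get_all_configs_alt
  by_cases h : n + 1 ≤ 0
  · rw [if_pos h, PySem.List.pyRange_one_eq_nil (by omega)]
    simp
  · rw [if_neg h]
    dsimp only
    rw [PySem.List.foldl_append_singleton_eq_map, pv_foldl_two_cols]
    dsimp only
    have hM : (n + 1) = (((n + 1).toNat : Nat) : Int) := by omega
    rw [hM]
    set M : Nat := (n + 1).toNat with hMdef
    have hcast : ((M : Int)) * M = ((M * M : Nat) : Int) := by push_cast; ring
    rw [hcast]
    simp only [pv_pyRepeat_natCast, pv_flatten_replicate_singleton, List.nil_append]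
    set ps : List (Int × Int) := (PySem.List.pyRange 0 ((M : Nat) : Int) 1).map
      (fun d => (d, n - d)) with hps
    have hlen : ps.length = M := by
      rw [hps]; simp [PySem.List.pyRange_one]
    have hmidlen : (ps.flatMap (fun p => List.replicate M p)).length = M * M := by
      simp [List.length_flatMap, hlen]
    -- tier-2 column: M*M copies of ps = M copies of (M copies of ps)
    rw [pv_replicate_mul_flatten M M ps]
    -- zip mid and lo columns blockwise
    rw [pv_zip_flatten_replicate M _ _ (by simp [hmidlen, hlen])]
    -- inner product (tiers 1 and 2)
    have hinner : ((ps.flatMap (fun p => List.replicate M p)).zip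
          ((List.replicate M ps).flatten))
        = ps.flatMap (fun b => ps.map (fun c => (b, c))) := by
      have := pv_zip_level M ps.length ps ps hlen rfl
      rw [hlen] at this
      exact this
    rw [hinner]
    -- outer product (tier 0 against the inner product)
    have hTlen : (ps.flatMap (fun b => ps.map (fun c => (b, c)))).length = M * M := by
      simp [List.length_flatMap, hlen]
    have houter := pv_zip_level (M * M) ps.length ps
      (ps.flatMap (fun b => ps.map (fun c => (b, c)))) hTlen rfl
    rw [hlen] at houter
    rw [houter]
    simp [List.map_flatMap, List.map_map, Function.comp_def]

-- ===== VERDICT (by name: the statement is the Claim_ definition above) =====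
theorem get_all_configs_spec : Claim_equal_get_all_configs := by
  intro n _
  unfold Spec_get_all_configs
  exact get_all_configs_eq_alt n
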